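-- pv_equiv track=rewrite | github.com/pypi-data/pypi-mirror-372 | packages/ansys-scade-design-rules/ansys_scade_design_rules-0.2.0.tar.gz/ansys_scade_design_rules-0.2.0/src/ansys/scade/design_rules/utils/naming.py | tokenize_name
-- ===== SOURCE A (Python) =====
-- from typing import Dict, List
--
-- def tokenize_name(word: str) -> List[str]:
--     """
--     Return the list of tokens constituting a word.
--
--     Parameters
--     ----------
--     word : str
--         Input word.
--
--     Returns
--     -------
--     List[str]
--         List of tokens.
--     """
--     tokens = []
--     for name in word.split('_'):
--         if name == '':
--             # word is prefixed or suffixed by '_'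
--             tokens.append('')
--             continue
--         # there must be a more clever algorithm, one pass
--         # for now, adapt an existing one
--         prev = name[0]
--         lower = prev
--         for c in name[1:]:
--             if c.isupper() and prev != '_':
--                 lower += '_'
--             prev = c
--             lower += c
--         lst = lower.split('_')
--         # merge successive uppercase singletons
--         prev = lst[0]
--         for token in lst[1:]:
--             if prev.isupper() and len(token) == 1 and token.isupper():
--                 prev += token
--             else:
--                 tokens.append(prev)
--                 prev = token
--         tokens.append(prev)
--     return tokens
-- ===== SOURCE B (Python) =====
-- from typing import List
--
--
-- def _close(acc, piece, tokens):
--     """Merge piece into acc (acronym rule) or flush acc into tokens."""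
--     if acc is None:
--         return piece
--     if acc.isupper() and len(piece) == 1 and piece.isupper():
--         return acc + piece
--     tokens.append(acc)
--     return piece
--
--
-- def tokenize_name(word: str) -> List[str]:
--     """Return the list of tokens constituting a word (single pass per segment)."""
--     tokens = []
--     for name in word.split('_'):
--         if name == '':
--             tokens.append('')
--             continue
--         acc = None
--         piece = name[0]
--         for c in name[1:]:
--             if c.isupper():
--                 acc = _close(acc, piece, tokens)
--                 piece = c
--             else:
--                 piece += c
--         tokens.append(_close(acc, piece, tokens))
--     return tokens
-- ===== Notes on version B (the rewrite author's own statement) =====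
-- stated objective: simpler
-- what changed: Per underscore-delimited segment, A builds an underscore-joined intermediate string, re-splits it, then merges uppercase singleton pieces in a second loop; B does one direct character pass maintaining the current piece and accumulated token, merging or flushing inline, with no intermediate string and no re-split.
import Mathlib
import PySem

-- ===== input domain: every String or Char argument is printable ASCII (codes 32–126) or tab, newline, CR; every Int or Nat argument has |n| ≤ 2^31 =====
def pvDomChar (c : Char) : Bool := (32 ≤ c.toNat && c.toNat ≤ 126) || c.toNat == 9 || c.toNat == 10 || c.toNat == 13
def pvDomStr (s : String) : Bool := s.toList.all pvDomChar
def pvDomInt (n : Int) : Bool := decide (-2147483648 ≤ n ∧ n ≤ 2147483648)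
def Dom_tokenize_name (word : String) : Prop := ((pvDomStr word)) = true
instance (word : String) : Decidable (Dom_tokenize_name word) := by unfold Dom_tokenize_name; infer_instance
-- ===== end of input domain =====

-- B replaces A's three passes per segment (insert underscores into a string, re-split it,
-- merge singleton pieces) by one direct character pass maintaining the current piece and
-- accumulated token; objective: simpler (and no intermediate string).

-- Python str.isupper on the ASCII domain: some cased (alphabetic) char and no lowercase char.
def pyStrIsupper (cs : List Char) : Bool :=
  cs.any PySem.Chars.isalpha && cs.all (fun c => !(PySem.Chars.islower c))

-- ===== PORT A =====
def tokenize_name (word : String) : List String :=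
  (PySem.Chars.splitOn word.toList ['_']).foldl (fun tokens name =>
    match name with
    | [] => tokens ++ [""]
    | c0 :: rest =>
      -- prev/lower loop: insert an underscore before every uppercase char
      let st := rest.foldl (fun (st : Char × List Char) c =>
          let lower := if PySem.Chars.isupper c && st.1 != '_' then st.2 ++ ['_'] else st.2
          (c, lower ++ [c])) (c0, [c0])
      match PySem.Chars.splitOn st.2 ['_'] with
      | [] => tokens  -- unreachable: splitOn never returns []
      | p0 :: ps =>
        -- merge successive uppercase singletons
        let mst := ps.foldl (fun (mst : List Char × List String) token =>
            if pyStrIsupper mst.1 && token.length == 1 && pyStrIsupper token then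
              (mst.1 ++ token, mst.2)
            else (token, mst.2 ++ [String.mk mst.1])) (p0, tokens)
        mst.2 ++ [String.mk mst.1]) []

-- ===== PORT B =====
-- _close from Source B: tokens is threaded instead of mutated.
def closePiece (acc : Option (List Char)) (piece : List Char) (tokens : List String) :
    List Char × List String :=
  match acc with
  | none => (piece, tokens)
  | some a =>
    if pyStrIsupper a && piece.length == 1 && pyStrIsupper piece then (a ++ piece, tokens)
    else (piece, tokens ++ [String.mk a])

def tokenize_name_alt (word : String) : List String :=
  (PySem.Chars.splitOn word.toList ['_']).foldl (fun tokens name =>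
    match name with
    | [] => tokens ++ [""]
    | c0 :: rest =>
      let st := rest.foldl
          (fun (st : Option (List Char) × List Char × List String) c =>
            if PySem.Chars.isupper c then
              let ct := closePiece st.1 st.2.1 st.2.2
              (some ct.1, [c], ct.2)
            else (st.1, st.2.1 ++ [c], st.2.2)) (none, [c0], tokens)
      let ct := closePiece st.1 st.2.1 st.2.2
      ct.2 ++ [String.mk ct.1]) []

-- ===== PRECONDITION & SPEC =====
def Spec_tokenize_name (word : String) (out : List String) : Prop := out = tokenize_name_alt word
instance (word : String) (out : List String) : Decidable (Spec_tokenize_name word out) := by unfold Spec_tokenize_name; infer_instance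

-- ===== CLAIM (what is proved, stated in full; the proofs are below) =====
def Claim_equal_tokenize_name : Prop := ∀ (word : String), Dom_tokenize_name word → Spec_tokenize_name word (tokenize_name word)

-- ===== LEMMAS AND PROOFS =====

def sp : List Char → List Char → List (List Char)
  | [], cur => [cur]
  | c :: t, cur => if c = '_' then cur :: sp t [] else sp t (cur ++ [c])
def pieces : List Char → List Char → List (List Char)
  | cur, [] => [cur]
  | cur, c :: cs => if PySem.Chars.isupper c then cur :: pieces [c] cs else pieces (cur ++ [c]) cs
def intercU : List (List Char) → List Char
  | [] => []
  | [p] => p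
  | p :: ps => p ++ '_' :: intercU ps
def ins : List Char → List Char
  | [] => []
  | c :: cs => (if PySem.Chars.isupper c then ['_', c] else [c]) ++ ins cs
def mergeRun : Option (List Char) → List String → List (List Char) →
    Option (List Char) × List String
  | acc, tokens, [] => (acc, tokens)
  | acc, tokens, p :: ps =>
      mergeRun (some (closePiece acc p tokens).1) (closePiece acc p tokens).2 ps

theorem go_spec (fuel : Nat) (l cur : List Char) (acc : List (List Char))
    (h : l.length < fuel) :
    PySem.Chars.splitOn.go ['_'] fuel l cur acc = acc.reverse ++ sp l cur.reverse := by
  induction fuel generalizing l cur acc with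
  | zero => omega
  | succ n ih =>
    cases l with
    | nil => simp [PySem.Chars.splitOn.go, sp]
    | cons c rest =>
      simp only [List.length_cons, Nat.add_lt_add_iff_right] at h
      by_cases hc : c = '_'
      · subst hc
        rw [PySem.Chars.splitOn.go]
        have hp : (['_'].isPrefixOf ('_' :: rest)) = true := by simp [List.isPrefixOf]
        rw [if_pos hp]
        show PySem.Chars.splitOn.go ['_'] n rest [] (cur.reverse :: acc) = _
        rw [ih _ _ _ h]
        simp [sp]
      · rw [PySem.Chars.splitOn.go]
        have hp : (['_'].isPrefixOf (c :: rest)) = false := by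
          simp [List.isPrefixOf]
          exact fun hh => absurd hh.symm hc
        rw [if_neg (by simp [hp])]
        rw [ih _ _ _ h]
        simp [sp, hc]

theorem splitOn_eq_sp (l : List Char) :
    PySem.Chars.splitOn l ['_'] = sp l [] := by
  rw [PySem.Chars.splitOn, go_spec] <;> simp

theorem sp_cons_us (t cur : List Char) : sp ('_' :: t) cur = cur :: sp t [] := by
  simp [sp]

theorem sp_cons_ne (c : Char) (t cur : List Char) (h : c ≠ '_') :
    sp (c :: t) cur = sp t (cur ++ [c]) := by
  simp [sp, h]

theorem sp_free (l : List Char) (cur : List Char) (h : '_' ∉ cur) :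
    ∀ seg ∈ sp l cur, '_' ∉ seg := by
  induction l generalizing cur with
  | nil => simpa [sp] using h
  | cons c t ih =>
    by_cases hc : c = '_'
    · subst hc
      rw [sp_cons_us]
      intro seg hseg
      rcases List.mem_cons.1 hseg with rfl | hseg
      · exact h
      · exact ih [] (by simp) seg hseg
    · rw [sp_cons_ne _ _ _ hc]
      exact ih (cur ++ [c]) (by simp [h, Ne.symm hc])

theorem sp_append_free (p : List Char) (h : '_' ∉ p) (rest cur : List Char) :
    sp (p ++ rest) cur = sp rest (cur ++ p) := by
  induction p generalizing cur with
  | nil => simp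
  | cons c p' ih =>
    have hc : c ≠ '_' := fun hh => h (hh ▸ List.mem_cons_self)
    have h' : '_' ∉ p' := fun hh => h (List.mem_cons_of_mem _ hh)
    rw [List.cons_append, sp_cons_ne _ _ _ hc, ih h']
    simp

theorem sp_intercU (P : List (List Char)) (hne : P ≠ [])
    (hfree : ∀ p ∈ P, '_' ∉ p) : sp (intercU P) [] = P := by
  induction P with
  | nil => exact absurd rfl hne
  | cons p ps ih =>
    cases ps with
    | nil =>
      have := sp_append_free p (hfree p (by simp)) [] []
      simpa [intercU, sp] using this
    | cons q qs =>
      have hfp : '_' ∉ p := hfree p (by simp)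
      show sp (p ++ '_' :: intercU (q :: qs)) [] = _
      rw [sp_append_free p hfp, List.nil_append, sp_cons_us,
        ih (by simp) (fun x hx => hfree x (List.mem_cons_of_mem _ hx))]

theorem phase1_eq (cs : List Char) (prev : Char) (cur : List Char)
    (hp : prev ≠ '_') (hc : '_' ∉ cs) :
    (cs.foldl (fun (st : Char × List Char) c =>
        let lower := if PySem.Chars.isupper c && st.1 != '_' then st.2 ++ ['_'] else st.2
        (c, lower ++ [c])) (prev, cur)).2 = cur ++ ins cs := by
  induction cs generalizing prev cur with
  | nil => simp [ins]
  | cons c cs' ih =>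
    have hcne : c ≠ '_' := fun hh => hc (hh ▸ List.mem_cons_self)
    have hc' : '_' ∉ cs' := fun hh => hc (List.mem_cons_of_mem _ hh)
    simp only [List.foldl_cons]
    rw [ih c _ hcne hc']
    have hpb : (prev != '_') = true := by simpa using hp
    by_cases hu : PySem.Chars.isupper c
    · simp [ins, hu, hpb]
    · simp [ins, hu]

theorem pieces_ne_nil (cur cs : List Char) : pieces cur cs ≠ [] := by
  cases cs with
  | nil => simp [pieces]
  | cons c cs' =>
    by_cases hu : PySem.Chars.isupper c
    · simp [pieces, hu]
    · simp only [pieces, if_neg hu]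
      exact pieces_ne_nil _ _

theorem intercU_cons (p : List Char) (P : List (List Char)) (h : P ≠ []) :
    intercU (p :: P) = p ++ '_' :: intercU P := by
  cases P with
  | nil => exact absurd rfl h
  | cons q qs => rfl

theorem ins_eq_intercU (cs cur : List Char) :
    cur ++ ins cs = intercU (pieces cur cs) := by
  induction cs generalizing cur with
  | nil => simp [ins, pieces, intercU]
  | cons c cs' ih =>
    by_cases hu : PySem.Chars.isupper c
    · simp only [pieces, if_pos hu, ins, intercU_cons _ _ (pieces_ne_nil _ _)]
      rw [← ih [c]]
      simp [hu]
    · simp only [pieces, if_neg hu, ins]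
      rw [← ih (cur ++ [c])]
      simp [hu]

theorem pieces_free (cur cs : List Char) (h1 : '_' ∉ cur) (h2 : '_' ∉ cs) :
    ∀ p ∈ pieces cur cs, '_' ∉ p := by
  induction cs generalizing cur with
  | nil => simpa [pieces] using h1
  | cons c cs' ih =>
    have hcne : c ≠ '_' := fun hh => h2 (hh ▸ List.mem_cons_self)
    have h2' : '_' ∉ cs' := fun hh => h2 (List.mem_cons_of_mem _ hh)
    by_cases hu : PySem.Chars.isupper c
    · simp only [pieces, if_pos hu]
      intro p hp
      rcases List.mem_cons.1 hp with rfl | hp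
      · exact h1
      · exact ih [c] (by simp [Ne.symm hcne]) h2' p hp
    · simp only [pieces, if_neg hu]
      exact ih (cur ++ [c]) (by simp [h1]; exact fun hh => absurd hh.symm hcne) h2'

theorem bloop_eq (cs : List Char) (acc : Option (List Char)) (cur : List Char)
    (tokens : List String) :
    (let st := cs.foldl
        (fun (st : Option (List Char) × List Char × List String) c =>
          if PySem.Chars.isupper c then
            let ct := closePiece st.1 st.2.1 st.2.2
            (some ct.1, [c], ct.2)
          else (st.1, st.2.1 ++ [c], st.2.2)) (acc, cur, tokens)
      let ct := closePiece st.1 st.2.1 st.2.2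
      ct.2 ++ [String.mk ct.1])
    = (let mr := mergeRun acc tokens (pieces cur cs)
       mr.2 ++ [String.mk (mr.1.getD [])]) := by
  induction cs generalizing acc cur tokens with
  | nil => simp [pieces, mergeRun]
  | cons c cs' ih =>
    by_cases hu : PySem.Chars.isupper c
    · simp only [List.foldl_cons, pieces, if_pos hu, mergeRun, hu, if_true]
      exact ih (some (closePiece acc cur tokens).1) [c] (closePiece acc cur tokens).2
    · simp only [List.foldl_cons, pieces, if_neg hu, hu, Bool.false_eq_true, if_false]
      exact ih acc (cur ++ [c]) tokens

theorem mergeRun_eq_foldA (ps : List (List Char)) (p0 : List Char) (tokens : List String) :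
    mergeRun (some p0) tokens ps
    = (some (ps.foldl (fun (mst : List Char × List String) token =>
          if pyStrIsupper mst.1 && token.length == 1 && pyStrIsupper token then
            (mst.1 ++ token, mst.2)
          else (token, mst.2 ++ [String.mk mst.1])) (p0, tokens)).1,
       (ps.foldl (fun (mst : List Char × List String) token =>
          if pyStrIsupper mst.1 && token.length == 1 && pyStrIsupper token then
            (mst.1 ++ token, mst.2)
          else (token, mst.2 ++ [String.mk mst.1])) (p0, tokens)).2) := by
  induction ps generalizing p0 tokens with
  | nil => simp [mergeRun]
  | cons p ps' ih =>
    simp only [mergeRun, List.foldl_cons, closePiece]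
    by_cases hcond : (pyStrIsupper p0 && p.length == 1 && pyStrIsupper p) = true
    · simp only [hcond, if_true]
      exact ih _ _
    · simp only [hcond, Bool.false_eq_true, if_false]
      exact ih _ _

def stepA (tokens : List String) (name : List Char) : List String :=
  match name with
  | [] => tokens ++ [""]
  | c0 :: rest =>
    let st := rest.foldl (fun (st : Char × List Char) c =>
        let lower := if PySem.Chars.isupper c && st.1 != '_' then st.2 ++ ['_'] else st.2
        (c, lower ++ [c])) (c0, [c0])
    match PySem.Chars.splitOn st.2 ['_'] with
    | [] => tokens
    | p0 :: ps =>
      let mst := ps.foldl (fun (mst : List Char × List String) token =>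
          if pyStrIsupper mst.1 && token.length == 1 && pyStrIsupper token then
            (mst.1 ++ token, mst.2)
          else (token, mst.2 ++ [String.mk mst.1])) (p0, tokens)
      mst.2 ++ [String.mk mst.1]

def stepB (tokens : List String) (name : List Char) : List String :=
  match name with
  | [] => tokens ++ [""]
  | c0 :: rest =>
    let st := rest.foldl
        (fun (st : Option (List Char) × List Char × List String) c =>
          if PySem.Chars.isupper c then
            let ct := closePiece st.1 st.2.1 st.2.2
            (some ct.1, [c], ct.2)
          else (st.1, st.2.1 ++ [c], st.2.2)) (none, [c0], tokens)
    let ct := closePiece st.1 st.2.1 st.2.2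
    ct.2 ++ [String.mk ct.1]

theorem step_eq (name : List Char) (tokens : List String) (hfree : '_' ∉ name) :
    stepA tokens name = stepB tokens name := by
  cases name with
  | nil => rfl
  | cons c0 rest =>
    have hc0 : c0 ≠ '_' := fun hh => hfree (hh ▸ List.mem_cons_self)
    have hrest : '_' ∉ rest := fun hh => hfree (List.mem_cons_of_mem _ hh)
    show stepA tokens (c0 :: rest) = stepB tokens (c0 :: rest)
    unfold stepA stepB
    simp only []
    rw [phase1_eq rest c0 [c0] hc0 hrest]
    have hP : PySem.Chars.splitOn ([c0] ++ ins rest) ['_'] = pieces [c0] rest := by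
      rw [ins_eq_intercU, splitOn_eq_sp]
      exact sp_intercU _ (pieces_ne_nil _ _)
        (pieces_free [c0] rest (by simp [Ne.symm hc0]) hrest)
    rw [hP]
    rw [bloop_eq rest none [c0] tokens]
    obtain ⟨p0, ps, hps⟩ : ∃ p0 ps, pieces [c0] rest = p0 :: ps := by
      cases h : pieces [c0] rest with
      | nil => exact absurd h (pieces_ne_nil _ _)
      | cons a b => exact ⟨a, b, rfl⟩
    rw [hps]
    show (let mst := ps.foldl _ (p0, tokens); mst.2 ++ [String.mk mst.1]) = _
    simp only [mergeRun, closePiece]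
    rw [mergeRun_eq_foldA]
    simp

theorem fold_eq (L : List (List Char)) (tokens : List String)
    (hfree : ∀ seg ∈ L, '_' ∉ seg) :
    L.foldl stepA tokens = L.foldl stepB tokens := by
  induction L generalizing tokens with
  | nil => rfl
  | cons seg L' ih =>
    rw [List.foldl_cons, List.foldl_cons, step_eq seg tokens (hfree seg (by simp)),
      ih _ (fun s hs => hfree s (List.mem_cons_of_mem _ hs))]

-- ===== VERDICT (by name: the statement is the Claim_ definition above) =====
theorem tokenize_name_spec : Claim_equal_tokenize_name := by
  intro word _
  unfold Spec_tokenize_name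
  have hA : tokenize_name word = (PySem.Chars.splitOn word.toList ['_']).foldl stepA [] := rfl
  have hB : tokenize_name_alt word = (PySem.Chars.splitOn word.toList ['_']).foldl stepB [] := rfl
  rw [hA, hB]
  refine fold_eq _ _ ?_
  rw [splitOn_eq_sp]
  exact sp_free _ [] (by simp)
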